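-- pv_equiv track=rewrite | github.com/QASystem-SymEngine/Encoder-Logic-JEPA | src/sate/context_fusion_head.py | _group_by_segment
-- ===== SOURCE A (Python) =====
-- from typing import List, Tuple, Dict, Optional
--
-- def _group_by_segment(
--     tokens: List[Tuple[str, int]], seg_meta: List[Tuple[int, int]]
-- ) -> List[List[Tuple[int, str]]]:
--     """
--     Trả về list các segment; mỗi segment là list (global_index, token_str)
--     """
--     assert len(tokens) == len(seg_meta)
--     groups: Dict[int, List[Tuple[int, str]]] = {}
--     for i, ((tok, _), (seg_id, _mod)) in enumerate(zip(tokens, seg_meta)):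
--         groups.setdefault(seg_id, []).append((i, tok))
--     return [groups[k] for k in sorted(groups.keys())]
-- ===== SOURCE B (Python) =====
-- from typing import List, Tuple
--
-- def _group_by_segment(
--     tokens: List[Tuple[str, int]], seg_meta: List[Tuple[int, int]]
-- ) -> List[List[Tuple[int, str]]]:
--     assert len(tokens) == len(seg_meta)
--     recs = [(seg_id, i, tok)
--             for i, ((tok, _), (seg_id, _mod)) in enumerate(zip(tokens, seg_meta))]
--     out = []
--     while recs:
--         k = min(r[0] for r in recs)
--         out.append([(i, tok) for (s, i, tok) in recs if s == k])
--         recs = [r for r in recs if r[0] != k]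
--     return out
-- ===== Notes on version B (the rewrite author's own statement) =====
-- stated objective: alternative
-- what changed: Replaces the mutable dict of buckets plus sorted keys with selection-by-minimum: repeatedly extract the group of the smallest remaining segment id from a flat record list, no dict and no sort.
import Mathlib
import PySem

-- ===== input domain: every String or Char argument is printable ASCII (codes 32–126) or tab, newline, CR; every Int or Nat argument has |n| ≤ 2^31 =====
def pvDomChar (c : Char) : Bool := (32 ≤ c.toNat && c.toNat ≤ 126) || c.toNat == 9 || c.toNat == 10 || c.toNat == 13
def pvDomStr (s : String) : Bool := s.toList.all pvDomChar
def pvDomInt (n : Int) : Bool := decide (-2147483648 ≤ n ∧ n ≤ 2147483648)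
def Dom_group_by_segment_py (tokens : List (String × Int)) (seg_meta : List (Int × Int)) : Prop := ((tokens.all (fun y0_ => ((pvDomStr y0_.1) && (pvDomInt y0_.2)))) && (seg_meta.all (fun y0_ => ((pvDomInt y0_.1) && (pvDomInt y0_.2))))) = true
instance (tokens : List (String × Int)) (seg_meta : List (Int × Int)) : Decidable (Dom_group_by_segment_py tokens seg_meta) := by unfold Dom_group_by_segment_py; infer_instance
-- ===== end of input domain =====

-- B replaces A's mutable dict of buckets + sorted keys with selection-by-minimum over a flat
-- record list (repeatedly emit and remove the group of the smallest remaining segment id);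
-- alternative decomposition, not claimed faster.


-- ===== PORT A =====
-- groups.setdefault(seg_id, []).append((i, tok)) mutates the bucket in place:
-- it is exactly d.modify seg_id [] (· ++ [(i, tok)]).
def group_by_segment_py (tokens : List (String × Int)) (seg_meta : List (Int × Int)) : List (List (Int × String)) :=
  let groups : PySem.Dict Int (List (Int × String)) :=
    (PySem.List.enumerate (tokens.zip seg_meta) 0).foldl
      (fun d p => d.modify p.2.2.1 [] (· ++ [(p.1, p.2.1.1)]))
      PySem.Dict.empty
  (PySem.List.sorted groups.keys (fun k => k) false).map (fun k => groups.getD k [])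

-- ===== PORT B =====
-- the while-loop of Source B: emit the bucket of the minimal remaining seg id, drop it, repeat
def pvSelLoop : List (Int × Int × String) → List (List (Int × String))
  | [] => []
  | r :: rs =>
    match hm : PySem.List.min? ((r :: rs).map (fun x => x.1)) (fun y => y) with
    | none => []   -- unreachable: min? of a nonempty list is some
    | some k =>
      (((r :: rs).filter (fun x => x.1 == k)).map (fun x => (x.2.1, x.2.2))) ::
        pvSelLoop ((r :: rs).filter (fun x => x.1 != k))
termination_by recs => recs.length
decreasing_by
  have hk : k ∈ (r :: rs).map (fun x => x.1) := PySem.List.min?_mem hm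
  obtain ⟨x, hx, hxk⟩ := List.mem_map.mp hk
  exact List.length_filter_lt_length_iff_exists.mpr ⟨x, hx, by simp [hxk]⟩

def group_by_segment_py_alt (tokens : List (String × Int)) (seg_meta : List (Int × Int)) : List (List (Int × String)) :=
  let recs : List (Int × Int × String) :=
    (PySem.List.enumerate (tokens.zip seg_meta) 0).map (fun p => (p.2.2.1, p.1, p.2.1.1))
  pvSelLoop recs

-- ===== PRECONDITION & SPEC =====
-- A's assert raises AssertionError when the lengths differ; Pre_ excludes exactly those inputs.
def Pre_group_by_segment_py (tokens : List (String × Int)) (seg_meta : List (Int × Int)) : Prop :=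
  tokens.length = seg_meta.length
instance (tokens : List (String × Int)) (seg_meta : List (Int × Int)) : Decidable (Pre_group_by_segment_py tokens seg_meta) := by unfold Pre_group_by_segment_py; infer_instance
def pvWitness_group_by_segment_py : (List (String × Int)) × (List (Int × Int)) :=
  ([("a", 0), ("b", 1), ("c", 2)], [(2, 0), (1, 0), (2, 1)])

def Spec_group_by_segment_py (tokens : List (String × Int)) (seg_meta : List (Int × Int)) (out : List (List (Int × String))) : Prop := out = group_by_segment_py_alt tokens seg_meta
instance (tokens : List (String × Int)) (seg_meta : List (Int × Int)) (out : List (List (Int × String))) : Decidable (Spec_group_by_segment_py tokens seg_meta out) := by unfold Spec_group_by_segment_py; infer_instance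

-- ===== CLAIM (what is proved, stated in full; the proofs are below) =====
def Claim_equal_group_by_segment_py : Prop := ∀ (tokens : List (String × Int)) (seg_meta : List (Int × Int)), Dom_group_by_segment_py tokens seg_meta → Pre_group_by_segment_py tokens seg_meta → Spec_group_by_segment_py tokens seg_meta (group_by_segment_py tokens seg_meta)

-- ===== LEMMAS AND PROOFS =====

-- the record view of one enumerated zip entry: (seg_id, i, tok)
def pvRec (p : Int × (String × Int) × (Int × Int)) : Int × Int × String := (p.2.2.1, p.1, p.2.1.1)

-- the common normal form both programs are reduced to:
-- for each distinct segment id in increasing order, the filtered bucket of the record list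
def pvFilterForm (recs : List (Int × Int × String)) : List (List (Int × String)) :=
  (PySem.List.sorted (PySem.Set.ofList (recs.map (fun r => r.1))) (fun y => y) false).map
    (fun k => (recs.filter (fun r => r.1 == k)).map (fun r => (r.2.1, r.2.2)))

-- A's grouping loop, rephrased as the canonical modify-append loop over the record list
theorem pvFold_eq (l : List (Int × (String × Int) × (Int × Int))) :
    l.foldl (fun d p => d.modify p.2.2.1 [] (· ++ [(p.1, p.2.1.1)])) PySem.Dict.empty
      = (l.map pvRec).foldl (fun d r => d.modify r.1 [] (· ++ [r.2])) PySem.Dict.empty := by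
  rw [List.foldl_map]
  rfl

-- both sides enumerate the same key list
theorem pvKeys_eq (l : List (Int × (String × Int) × (Int × Int))) :
    ((l.map pvRec).foldl (fun d r => d.modify r.1 [] (· ++ [r.2])) PySem.Dict.empty).keys
      = PySem.Set.ofList ((l.map pvRec).map (·.1)) := by
  rw [PySem.Dict.keys_foldl_modify_key]
  simp [PySem.Set.update, PySem.Set.ofList_eq_foldl]

-- each bucket of A's dict is the filter of the record list
theorem pvBucket_eq (rs : List (Int × Int × String)) (k : Int) :
    (rs.foldl (fun d r => d.modify r.1 [] (· ++ [r.2])) PySem.Dict.empty).getD k []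
      = (rs.filter (fun r => r.1 == k)).map (fun r => (r.2.1, r.2.2)) := by
  rw [PySem.Dict.getD_foldl_modify_append]
  simp

-- A computes the normal form
theorem pvA_eq_filterForm (tokens : List (String × Int)) (seg_meta : List (Int × Int)) :
    group_by_segment_py tokens seg_meta
      = pvFilterForm ((PySem.List.enumerate (tokens.zip seg_meta) 0).map pvRec) := by
  simp only [group_by_segment_py, pvFilterForm]
  rw [pvFold_eq, pvKeys_eq]
  apply List.map_congr_left
  intro k _
  exact pvBucket_eq _ k

-- filtering a k-free list by a key k' ≠ k sees the whole original list
theorem pvFilter_filter (recs : List (Int × Int × String)) (k k' : Int) (h : k' ≠ k) :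
    (recs.filter (fun x => x.1 != k)).filter (fun x => x.1 == k')
      = recs.filter (fun x => x.1 == k') := by
  rw [List.filter_filter]
  apply List.filter_congr
  intro x _
  by_cases hxk : x.1 = k'
  · simp [hxk, h]
  · simp [hxk]

-- the sorted distinct keys split off their minimum
theorem pvSortedKeys_cons (r : Int × Int × String) (rs : List (Int × Int × String)) (k : Int)
    (hmin : PySem.List.min? ((r :: rs).map (fun x => x.1)) (fun y => y) = some k) :
    PySem.List.sorted (PySem.Set.ofList ((r :: rs).map (fun x => x.1))) (fun y => y) false
      = k :: PySem.List.sorted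
          (PySem.Set.ofList (((r :: rs).filter (fun x => x.1 != k)).map (fun x => x.1)))
          (fun y => y) false := by
  set recs := r :: rs with hrecs
  set tail := PySem.List.sorted
      (PySem.Set.ofList ((recs.filter (fun x => x.1 != k)).map (fun x => x.1)))
      (fun y => y) false with htail
  have hmemtail : ∀ y ∈ tail, y ∈ recs.map (fun x => x.1) ∧ y ≠ k := by
    intro y hy
    have : y ∈ PySem.Set.ofList ((recs.filter (fun x => x.1 != k)).map (fun x => x.1)) :=
      (PySem.List.mem_sorted _ _ _ _).mp hy
    have hy2 : y ∈ (recs.filter (fun x => x.1 != k)).map (fun x => x.1) :=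
      (PySem.Set.mem_ofList _ _).mp this
    obtain ⟨x, hx, hxy⟩ := List.mem_map.mp hy2
    obtain ⟨hxmem, hxk⟩ := List.mem_filter.mp hx
    constructor
    · exact List.mem_map.mpr ⟨x, hxmem, hxy⟩
    · subst hxy; simpa using hxk
  apply PySem.List.sorted_eq_of_perm_of_pairwise_lt
  · -- permutation with the distinct keys
    apply (List.perm_ext_iff_of_nodup ?_ ?_).mpr
    · intro y
      constructor
      · intro hy
        rcases List.mem_cons.mp hy with hy | hy
        · subst hy
          exact (PySem.Set.mem_ofList _ _).mpr (PySem.List.min?_mem hmin)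
        · exact (PySem.Set.mem_ofList _ _).mpr (hmemtail y hy).1
      · intro hy
        have hy' : y ∈ recs.map (fun x => x.1) := (PySem.Set.mem_ofList _ _).mp hy
        by_cases hyk : y = k
        · exact List.mem_cons.mpr (Or.inl hyk)
        · apply List.mem_cons.mpr; right
          rw [htail, PySem.List.mem_sorted, PySem.Set.mem_ofList]
          obtain ⟨x, hx, hxy⟩ := List.mem_map.mp hy'
          exact List.mem_map.mpr ⟨x, List.mem_filter.mpr ⟨hx, by simp [hxy, hyk]⟩, hxy⟩
    · -- k :: tail has no duplicates
      apply List.nodup_cons.mpr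
      constructor
      · intro hk
        exact (hmemtail k hk).2 rfl
      · exact ((PySem.List.sorted_perm _ _ _).nodup_iff).mpr (PySem.Set.nodup_ofList _)
    · exact PySem.Set.nodup_ofList _
  · -- strictly increasing
    apply List.pairwise_cons.mpr
    constructor
    · intro y hy
      obtain ⟨hymem, hyk⟩ := hmemtail y hy
      exact lt_of_le_of_ne (PySem.List.min?_isMin hmin y hymem) (Ne.symm hyk)
    · exact PySem.List.sorted_ofList_pairwise_lt _

-- B computes the normal form
theorem pvSel_eq (recs : List (Int × Int × String)) : pvSelLoop recs = pvFilterForm recs := by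
  induction recs using pvSelLoop.induct with
  | case1 => simp [pvSelLoop, pvFilterForm, PySem.Set.ofList_nil]
  | case2 r rs hm =>
    exfalso
    have := (PySem.List.min?_eq_none_iff _ _).mp hm
    simp at this
  | case3 r rs k hm ih =>
    have hstep : pvSelLoop (r :: rs)
        = (((r :: rs).filter (fun x => x.1 == k)).map (fun x => (x.2.1, x.2.2))) ::
            pvSelLoop ((r :: rs).filter (fun x => x.1 != k)) := by
      rw [pvSelLoop.eq_def]
      split
      next h => exact absurd h (List.cons_ne_nil _ _)
      next r' rs' h =>
        injection h with h1 h2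
        subst h1; subst h2
        split
        next h' => rw [hm] at h'; cases h'
        next k' h' => rw [hm] at h'; injection h' with hk; subst hk; rfl
    rw [hstep, ih]
    simp only [pvFilterForm]
    rw [pvSortedKeys_cons r rs k hm, List.map_cons]
    congr 1
    apply List.map_congr_left
    intro k' hk'
    have hk'ne : k' ≠ k := by
      have := (PySem.List.mem_sorted _ _ _ _).mp hk'
      have hk'2 := (PySem.Set.mem_ofList _ _).mp this
      obtain ⟨x, hx, hxy⟩ := List.mem_map.mp hk'2
      obtain ⟨_, hxk⟩ := List.mem_filter.mp hx
      subst hxy; simpa using hxk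
    rw [pvFilter_filter _ k k' hk'ne]

theorem group_by_segment_py_eq (tokens : List (String × Int)) (seg_meta : List (Int × Int)) :
    group_by_segment_py tokens seg_meta = group_by_segment_py_alt tokens seg_meta := by
  rw [pvA_eq_filterForm]
  simp only [group_by_segment_py_alt]
  rw [pvSel_eq]
  rfl

-- ===== VERDICT (by name: the statement is the Claim_ definition above) =====
theorem group_by_segment_py_spec : Claim_equal_group_by_segment_py := by
  intro tokens seg_meta _ _
  unfold Spec_group_by_segment_py
  exact group_by_segment_py_eq tokens seg_meta
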